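-- pv_equiv track=rewrite | github.com/Ushakov92/HomeWorkPython2 | task10.py | coins_sides
-- ===== SOURCE A (Python) =====
-- def coins_sides(coins_side=[]):
--     tails = 0
--     eagles = 0
--     for i in coins_side:
--         if i == 0:
--             tails += 1
--         else:
--             eagles += 1
--     return tails, eagles
-- ===== SOURCE B (Python) =====
-- def coins_sides(coins_side=[]):
--     # Divide-and-conquer: count zeros/non-zeros on each half of the index
--     # range independently and add the pair results (recursion depth O(log n)).
--     def go(lo, hi):
--         if hi - lo == 0:
--             return (0, 0)
--         if hi - lo == 1:
--             return (1, 0) if coins_side[lo] == 0 else (0, 1)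
--         mid = (lo + hi) // 2
--         t1, e1 = go(lo, mid)
--         t2, e2 = go(mid, hi)
--         return (t1 + t2, e1 + e2)
--     return go(0, len(coins_side))
-- ===== Notes on version B (the rewrite author's own statement) =====
-- stated objective: alternative
-- what changed: Replaces the single linear two-counter loop with a divide-and-conquer recursion over index ranges that counts each half independently and adds the pair results.
import Mathlib
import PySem

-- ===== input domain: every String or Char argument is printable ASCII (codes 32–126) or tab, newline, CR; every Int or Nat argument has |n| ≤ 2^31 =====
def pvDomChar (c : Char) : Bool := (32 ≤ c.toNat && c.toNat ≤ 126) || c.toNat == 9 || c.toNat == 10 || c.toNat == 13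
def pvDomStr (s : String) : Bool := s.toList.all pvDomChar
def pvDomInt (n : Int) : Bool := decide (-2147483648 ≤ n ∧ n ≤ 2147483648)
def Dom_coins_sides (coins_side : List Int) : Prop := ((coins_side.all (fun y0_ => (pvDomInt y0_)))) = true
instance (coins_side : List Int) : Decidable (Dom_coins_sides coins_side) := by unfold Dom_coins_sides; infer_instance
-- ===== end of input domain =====

-- B replaces the two-counter linear loop with a divide-and-conquer recursion over index ranges (alternative decomposition, same cost).

-- ===== PORT A =====
def coins_sides (coins_side : List Int) : Int × Int :=
  coins_side.foldl (fun (st : Int × Int) i =>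
    if i == 0 then (st.1 + 1, st.2) else (st.1, st.2 + 1)) (0, 0)

-- ===== PORT B =====
-- go: Python's inner go(lo, hi); `fuel` is only a termination guard (any fuel
-- ≥ hi - lo gives Python's value; the fuel-0 branch is never reached), and
-- coins_side[lo] is always in range (0 ≤ lo < len) along B's recursion, so
-- l.getD lo 0 is exact for Python's coins_side[lo] here.
def coins_sides_go (fuel : Nat) (l : List Int) (lo hi : Nat) : Int × Int :=
  match fuel with
  | 0 => (0, 0)
  | fuel + 1 =>
    if hi - lo = 0 then (0, 0)
    else if hi - lo = 1 then
      (if l.getD lo 0 == 0 then ((1 : Int), (0 : Int)) else (0, 1))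
    else
      let mid := (lo + hi) / 2
      let a := coins_sides_go fuel l lo mid
      let b := coins_sides_go fuel l mid hi
      (a.1 + b.1, a.2 + b.2)

def coins_sides_alt (coins_side : List Int) : Int × Int :=
  coins_sides_go coins_side.length coins_side 0 coins_side.length

-- ===== PRECONDITION & SPEC =====
def Spec_coins_sides (coins_side : List Int) (out : Int × Int) : Prop := out = coins_sides_alt coins_side
instance (coins_side : List Int) (out : Int × Int) : Decidable (Spec_coins_sides coins_side out) := by unfold Spec_coins_sides; infer_instance

-- ===== CLAIM (what is proved, stated in full; the proofs are below) =====
def Claim_equal_coins_sides : Prop := ∀ (coins_side : List Int), Dom_coins_sides coins_side → Spec_coins_sides coins_side (coins_sides coins_side)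

-- ===== LEMMAS AND PROOFS =====

-- A's loop in closed form: zeros counted, rest is length minus zeros.
lemma coins_sides_loop (l : List Int) (t e : Int) :
    l.foldl (fun (st : Int × Int) i =>
      if i == 0 then (st.1 + 1, st.2) else (st.1, st.2 + 1)) (t, e)
      = (t + l.count 0, e + (l.length : Int) - l.count 0) := by
  induction l generalizing t e with
  | nil => simp
  | cons x xs ih =>
    simp only [List.foldl_cons]
    by_cases h : x = 0
    · rw [if_pos (by simp [h]), ih]
      simp [List.count_cons, h, Prod.ext_iff]
      constructor <;> ring
    · rw [if_neg (by simp [h]), ih]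
      simp [List.count_cons, h, Prod.ext_iff]
      ring

-- B's recursion in closed form on the segment [lo, hi).
lemma coins_sides_go_eq (l : List Int) : ∀ (fuel lo hi : Nat), hi - lo ≤ fuel → hi ≤ l.length →
    coins_sides_go fuel l lo hi =
      ((((l.drop lo).take (hi - lo)).count 0 : Int),
        ((hi - lo : Nat) : Int) - (((l.drop lo).take (hi - lo)).count 0 : Int)) := by
  intro fuel
  induction fuel with
  | zero =>
    intro lo hi h _
    have h0 : hi - lo = 0 := by omega
    simp [coins_sides_go, h0]
  | succ fuel ih =>
    intro lo hi h hhi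
    by_cases h0 : hi - lo = 0
    · simp [coins_sides_go, h0]
    by_cases h1 : hi - lo = 1
    · have hlo : lo < l.length := by omega
      have hd : (l.drop lo).take 1 = [l[lo]] := by
        rw [List.drop_eq_getElem_cons hlo, List.take_succ_cons, List.take_zero]
      by_cases hz : l[lo] = 0 <;>
        simp [coins_sides_go, h0, h1, hd, List.getElem?_eq_getElem hlo, hz, List.count_cons]
    · rw [coins_sides_go]
      rw [if_neg h0, if_neg h1]
      have hm1 : (lo + hi) / 2 - lo ≤ fuel := by omega
      have hm2 : hi - (lo + hi) / 2 ≤ fuel := by omega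
      show ((coins_sides_go fuel l lo ((lo + hi) / 2)).1 + (coins_sides_go fuel l ((lo + hi) / 2) hi).1,
            (coins_sides_go fuel l lo ((lo + hi) / 2)).2 + (coins_sides_go fuel l ((lo + hi) / 2) hi).2) = _
      rw [ih lo ((lo + hi) / 2) hm1 (by omega), ih ((lo + hi) / 2) hi hm2 hhi]
      have hsplit : (l.drop lo).take (hi - lo)
          = (l.drop lo).take ((lo + hi) / 2 - lo)
            ++ (l.drop ((lo + hi) / 2)).take (hi - (lo + hi) / 2) := by
        have hdd : l.drop ((lo + hi) / 2) = (l.drop lo).drop ((lo + hi) / 2 - lo) := by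
          rw [List.drop_drop]
          congr 1
          omega
        rw [hdd, ← List.take_add]
        congr 1
        omega
      rw [hsplit]
      refine Prod.ext ?_ ?_ <;> simp [List.count_append] <;> omega

theorem coins_sides_spec : Claim_equal_coins_sides := by
  intro l _
  show coins_sides l = coins_sides_alt l
  rw [coins_sides, coins_sides_alt,
    coins_sides_go_eq l l.length 0 l.length le_rfl le_rfl, coins_sides_loop]
  simp
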